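-- pv_equiv track=rewrite | github.com/lerouxb/ni | editors/gtk/dialogs.py | pattern_char_generator
-- ===== SOURCE A (Python) =====
-- def pattern_char_generator(pattern):
--     is_wildcard = False
--     for char in pattern:
--         if char == '/':
--             yield True, is_wildcard, '/'
--         elif char == '*':
--             is_wildcard = True
--             continue
--         else:
--             yield False, is_wildcard, char
--         is_wildcard = False
-- ===== SOURCE B (Python) =====
-- def pattern_char_generator(pattern):
--     flags = [False] + [char == '*' for char in pattern]
--     for flag, char in zip(flags, pattern):
--         if char != '*':
--             yield char == '/', flag, char
-- ===== Notes on version B (the rewrite author's own statement) =====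
-- stated objective: alternative
-- what changed: Replaces A's single pass with a set/reset is_wildcard flag and continue by two staged passes: first precompute a wildcard-flag list ([False] + [c=='*' for c in pattern]), then zip it with the pattern and yield for every non-star char.
import Mathlib
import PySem

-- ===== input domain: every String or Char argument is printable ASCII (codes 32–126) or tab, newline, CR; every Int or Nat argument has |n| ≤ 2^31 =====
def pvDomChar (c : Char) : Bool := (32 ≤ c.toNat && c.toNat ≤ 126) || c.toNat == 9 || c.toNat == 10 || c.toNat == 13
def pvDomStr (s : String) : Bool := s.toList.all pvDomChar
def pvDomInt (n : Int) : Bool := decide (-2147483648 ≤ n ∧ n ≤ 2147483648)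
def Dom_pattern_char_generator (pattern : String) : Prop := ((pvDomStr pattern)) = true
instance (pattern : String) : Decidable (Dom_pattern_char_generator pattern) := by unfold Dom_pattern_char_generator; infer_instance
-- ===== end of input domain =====

-- B replaces A's single pass with a set/reset is_wildcard flag by two staged passes: precompute a
-- wildcard-flag list, then zip it with the pattern (objective: alternative; same O(n) cost).
-- ===== PORT A =====
-- A's generator loop as structural recursion over the chars, state = the is_wildcard flag.
def pcgA : Bool → List Char → List (Bool × Bool × String)
  | _, [] => []
  | wc, c :: rest =>
    if c = '/' then (true, wc, "/") :: pcgA false rest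
    else if c = '*' then pcgA true rest
    else (false, wc, String.ofList [c]) :: pcgA false rest

def pattern_char_generator (pattern : String) : List (Bool × Bool × String) :=
  pcgA false pattern.toList

-- ===== PORT B =====
-- B, pass 2: the for-loop over zip(flags, pattern), yielding for every non-star char.
def pcgBloop : List (Bool × Char) → List (Bool × Bool × String)
  | [] => []
  | (flag, c) :: rest =>
    if c ≠ '*' then (decide (c = '/'), flag, String.ofList [c]) :: pcgBloop rest
    else pcgBloop rest

def pattern_char_generator_alt (pattern : String) : List (Bool × Bool × String) :=
  -- pass 1: flags = [False] + [char == '*' for char in pattern]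
  let flags : List Bool := false :: pattern.toList.map (fun c => decide (c = '*'))
  pcgBloop (flags.zip pattern.toList)

-- ===== PRECONDITION & SPEC =====
def Spec_pattern_char_generator (pattern : String) (out : List (Bool × Bool × String)) : Prop := out = pattern_char_generator_alt pattern
instance (pattern : String) (out : List (Bool × Bool × String)) : Decidable (Spec_pattern_char_generator pattern out) := by unfold Spec_pattern_char_generator; infer_instance

-- ===== CLAIM (what is proved, stated in full; the proofs are below) =====
def Claim_equal_pattern_char_generator : Prop := ∀ (pattern : String), Dom_pattern_char_generator pattern → Spec_pattern_char_generator pattern (pattern_char_generator pattern)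

-- ===== LEMMAS AND PROOFS =====
lemma pcgA_eq_pcgB (l : List Char) (flag : Bool) :
    pcgA flag l = pcgBloop ((flag :: l.map (fun c => decide (c = '*'))).zip l) := by
  induction l generalizing flag with
  | nil => rfl
  | cons c rest ih =>
    by_cases hc : c = '*'
    · subst hc
      simpa [pcgA, pcgBloop] using ih true
    · by_cases hs : c = '/'
      · subst hs
        simp [pcgA, pcgBloop, ih false]
      · simp [pcgA, pcgBloop, hc, hs, ih false]

-- ===== VERDICT (by name: the statement is the Claim_ definition above) =====
theorem pattern_char_generator_spec : Claim_equal_pattern_char_generator := by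
  intro p _
  unfold Spec_pattern_char_generator pattern_char_generator pattern_char_generator_alt
  exact pcgA_eq_pcgB p.toList false
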